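-- pv_equiv track=rewrite | github.com/python-feladatok-tesztekkel/05-01-04-ciklusok | feladatok.py | szorzat_osszeg
-- ===== SOURCE A (Python) =====
-- def szorzat_osszeg(n:int)->int:
--     if n>0:
--         szum = 0
--         for i in range(1,n+1):
--             szum = szum+(i*(i+1))
--         return szum
--     else:
--         return None
-- ===== SOURCE B (Python) =====
-- def szorzat_osszeg(n: int) -> int:
--     if n <= 0:
--         return None
--     # sum of i*(i+1) = sum of squares + sum of i, each by its classical closed form
--     negyzetek = n * (n + 1) * (2 * n + 1) // 6
--     linearis = n * (n + 1) // 2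
--     return negyzetek + linearis
-- ===== Notes on version B (the rewrite author's own statement) =====
-- stated objective: faster
-- what changed: Replaced the O(n) accumulation loop by closed forms: sum of i*(i+1) split into the square-pyramidal number plus the triangular number.
import Mathlib
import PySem

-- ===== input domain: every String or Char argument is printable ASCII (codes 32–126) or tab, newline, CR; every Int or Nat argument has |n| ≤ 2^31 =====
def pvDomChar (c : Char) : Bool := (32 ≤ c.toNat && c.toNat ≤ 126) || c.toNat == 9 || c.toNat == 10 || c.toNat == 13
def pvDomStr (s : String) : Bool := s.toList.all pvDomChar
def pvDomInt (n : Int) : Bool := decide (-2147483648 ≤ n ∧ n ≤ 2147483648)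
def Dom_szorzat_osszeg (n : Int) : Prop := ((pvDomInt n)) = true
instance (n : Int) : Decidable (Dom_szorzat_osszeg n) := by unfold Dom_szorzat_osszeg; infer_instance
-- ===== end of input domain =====

-- B replaces A's O(n) loop by two classical closed forms (square-pyramidal + triangular number); objective: faster.

-- ===== PORT A =====
def szorzat_osszeg (n : Int) : Option Int :=
  if n > 0 then
    some ((PySem.List.pyRange 1 (n + 1) 1).foldl (fun szum i => szum + i * (i + 1)) 0)
  else
    none

-- ===== PORT B =====
def szorzat_osszeg_alt (n : Int) : Option Int :=
  if n ≤ 0 then none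
  else
    let negyzetek := PySem.Int.floordiv (n * (n + 1) * (2 * n + 1)) 6
    let linearis := PySem.Int.floordiv (n * (n + 1)) 2
    some (negyzetek + linearis)

-- ===== PRECONDITION & SPEC =====
def Spec_szorzat_osszeg (n : Int) (out : Option Int) : Prop := out = szorzat_osszeg_alt n
instance (n : Int) (out : Option Int) : Decidable (Spec_szorzat_osszeg n out) := by unfold Spec_szorzat_osszeg; infer_instance

-- ===== CLAIM (what is proved, stated in full; the proofs are below) =====
def Claim_equal_szorzat_osszeg : Prop := ∀ (n : Int), Dom_szorzat_osszeg n → Spec_szorzat_osszeg n (szorzat_osszeg n)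

-- ===== LEMMAS AND PROOFS =====

-- The loop's value, tripled, equals n*(n+1)*(n+2).
theorem pv_loop_closed (m : Nat) :
    3 * ((PySem.List.pyRange 1 ((m : Int) + 1) 1).foldl (fun szum i => szum + i * (i + 1)) 0)
      = (m : Int) * ((m : Int) + 1) * ((m : Int) + 2) := by
  induction m with
  | zero =>
    simp [PySem.List.pyRange]
  | succ k ih =>
    have hle : (1 : Int) ≤ (k : Int) + 1 := by omega
    have hstep : PySem.List.pyRange 1 ((k : Int) + 1 + 1) 1
        = PySem.List.pyRange 1 ((k : Int) + 1) 1 ++ [(k : Int) + 1] :=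
      PySem.List.pyRange_one_succ_right hle
    push_cast
    rw [hstep, List.foldl_append]
    simp only [List.foldl]
    ring_nf
    ring_nf at ih
    omega

theorem pv_six_dvd (m : Nat) : ∃ k : Int, (m : Int) * (m + 1) * (2 * m + 1) = 6 * k := by
  induction m with
  | zero => exact ⟨0, by norm_num⟩
  | succ k ih =>
    obtain ⟨c, hc⟩ := ih
    refine ⟨c + ((k : Int) + 1) ^ 2, ?_⟩
    push_cast
    linear_combination hc

theorem pv_two_dvd (m : Nat) : ∃ j : Int, (m : Int) * (m + 1) = 2 * j := by
  induction m with
  | zero => exact ⟨0, by norm_num⟩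
  | succ k ih =>
    obtain ⟨c, hc⟩ := ih
    refine ⟨c + ((k : Int) + 1), ?_⟩
    push_cast
    linear_combination hc

-- ===== VERDICT (by name: the statement is the Claim_ definition above) =====
theorem szorzat_osszeg_spec : Claim_equal_szorzat_osszeg := by
  intro n _
  unfold Spec_szorzat_osszeg szorzat_osszeg szorzat_osszeg_alt
  by_cases h : n > 0
  · simp only [h, if_pos, if_neg (by omega : ¬ n ≤ 0)]
    obtain ⟨m, rfl⟩ : ∃ m : Nat, n = (m : Int) := ⟨n.toNat, (Int.toNat_of_nonneg (by omega)).symm⟩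
    have hc := pv_loop_closed m
    obtain ⟨k, hk⟩ := pv_six_dvd m
    obtain ⟨j, hj⟩ := pv_two_dvd m
    rw [PySem.Int.floordiv_eq_ediv_of_pos (by norm_num),
        PySem.Int.floordiv_eq_ediv_of_pos (by norm_num), hk, hj,
        Int.mul_ediv_cancel_left k (by norm_num), Int.mul_ediv_cancel_left j (by norm_num)]
    congr 1
    have h6 : 6 * List.foldl (fun szum i => szum + i * (i + 1)) 0
        (PySem.List.pyRange 1 ((m : Int) + 1)) = 6 * (k + j) := by
      linear_combination hk + 3 * hj + 2 * hc
    omega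
  · simp [h, show n ≤ 0 by omega]
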